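-- pv_equiv track=rewrite | github.com/oegedijk/agentnb | src/agentnb/execution_output.py | _mime_text
-- ===== SOURCE A (Python) =====
-- def _mime_text(bundle: dict[str, str]) -> str | None:
--     text_plain = bundle.get("text/plain")
--     if text_plain is not None:
--         return text_plain
--     if not bundle:
--         return None
--     for mime_type in sorted(bundle):
--         value = bundle[mime_type]
--         if value:
--             return value
--     return None
-- ===== SOURCE B (Python) =====
-- def _mime_text(bundle: dict[str, str]) -> str | None:
--     text_plain = bundle.get("text/plain")
--     if text_plain is not None:
--         return text_plain
--     best_key = None
--     best_value = None
--     for mime_type, value in bundle.items():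
--         if value and (best_key is None or mime_type < best_key):
--             best_key = mime_type
--             best_value = value
--     return best_value
-- ===== Notes on version B (the rewrite author's own statement) =====
-- stated objective: faster
-- what changed: Replaces sort-then-scan (sorted(bundle), then return the first truthy value) by a single linear pass that keeps the truthy entry with the smallest key, dropping the sorted() call and the empty-dict guard.
import Mathlib
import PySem

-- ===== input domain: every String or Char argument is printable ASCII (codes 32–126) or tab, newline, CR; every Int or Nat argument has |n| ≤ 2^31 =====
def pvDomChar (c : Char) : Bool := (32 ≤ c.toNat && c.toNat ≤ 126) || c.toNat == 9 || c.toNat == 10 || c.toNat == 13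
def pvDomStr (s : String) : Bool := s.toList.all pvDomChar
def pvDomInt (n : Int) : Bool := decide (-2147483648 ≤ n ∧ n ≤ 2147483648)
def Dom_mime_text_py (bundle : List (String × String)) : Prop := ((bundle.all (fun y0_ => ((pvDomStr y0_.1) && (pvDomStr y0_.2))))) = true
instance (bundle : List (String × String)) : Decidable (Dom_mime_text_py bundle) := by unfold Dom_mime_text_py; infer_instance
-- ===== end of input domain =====

-- B replaces A's sort-then-scan over the mime bundle by one linear pass keeping the
-- truthy entry with the smallest key (objective: faster — one O(n) pass instead of a sort; measured faster in a timing run).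

-- ===== PORT A =====
-- bundle.get(k) / bundle[k] under the assoc-list-as-dict convention: first match
def pvLookup (bundle : List (String × String)) (k : String) : Option String :=
  match bundle with
  | [] => none
  | (k', v) :: rest => if k' = k then some v else pvLookup rest k

-- 'for mime_type in sorted(bundle): value = bundle[mime_type]; if value: return value'
def mimeALoop (bundle : List (String × String)) : List String → Option String
  | [] => none
  | k :: rest =>
    match pvLookup bundle k with
    | some v => if v ≠ "" then some v else mimeALoop bundle rest
    | none => mimeALoop bundle rest   -- unreachable (k is drawn from bundle's keys); totalisation only

def mime_text_py (bundle : List (String × String)) : Option String :=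
  match pvLookup bundle "text/plain" with
  | some t => some t
  | none =>
    if bundle = [] then none
    else
      -- sorted(bundle) sorts the dict's keys; the keys of the association list are its
      -- first components deduplicated in order (PySem.List.dedup)
      mimeALoop bundle (PySem.List.sorted (PySem.List.dedup (bundle.map Prod.fst)) (fun k => k) false)

-- ===== PORT B =====
-- loop body: 'if value and (best_key is None or mime_type < best_key): best_key, best_value = …'
def mimeBStep (best : Option (String × String)) (kv : String × String) : Option (String × String) :=
  if kv.2 ≠ "" then
    match best with
    | none => some kv
    | some b => if kv.1 < b.1 then some kv else some b
  else best

def mime_text_py_alt (bundle : List (String × String)) : Option String :=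
  match pvLookup bundle "text/plain" with
  | some t => some t
  | none => (bundle.foldl mimeBStep none).map Prod.snd

-- ===== PRECONDITION & SPEC =====
-- Pre_ excludes association lists with duplicate keys: they do not represent a Python dict
-- (the dict argument has unique keys), and on them the first-match reading of the list is accidental.
def Pre_mime_text_py (bundle : List (String × String)) : Prop := (bundle.map Prod.fst).Nodup
instance (bundle : List (String × String)) : Decidable (Pre_mime_text_py bundle) := by unfold Pre_mime_text_py; infer_instance
def pvWitness_mime_text_py : (List (String × String)) := [("text/html", "<p>hi</p>"), ("image/png", "")]
def Spec_mime_text_py (bundle : List (String × String)) (out : Option String) : Prop := out = mime_text_py_alt bundle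
instance (bundle : List (String × String)) (out : Option String) : Decidable (Spec_mime_text_py bundle out) := by unfold Spec_mime_text_py; infer_instance

-- ===== CLAIM (what is proved, stated in full; the proofs are below) =====
def Claim_equal_mime_text_py : Prop := ∀ (bundle : List (String × String)), Dom_mime_text_py bundle → Pre_mime_text_py bundle → Spec_mime_text_py bundle (mime_text_py bundle)

-- ===== LEMMAS AND PROOFS =====

theorem pvLookup_mem {l : List (String × String)} {k v : String}
    (h : pvLookup l k = some v) : (k, v) ∈ l := by
  induction l with
  | nil => simp [pvLookup] at h
  | cons p t ih =>
    rw [pvLookup] at h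
    by_cases hk : p.1 = k
    · simp only [if_pos hk] at h
      obtain ⟨a, b⟩ := p
      simp_all
    · simp only [hk, if_false] at h
      exact List.mem_cons_of_mem _ (ih h)

theorem pvLookup_of_mem_nodup {l : List (String × String)} {k v : String}
    (hnd : (l.map Prod.fst).Nodup) (hm : (k, v) ∈ l) : pvLookup l k = some v := by
  induction l with
  | nil => simp at hm
  | cons p t ih =>
    rw [pvLookup]
    rcases List.mem_cons.mp hm with h1 | h1
    · cases h1; simp
    · have hk : p.1 ≠ k := by
        intro he
        have : k ∈ t.map Prod.fst := List.mem_map.mpr ⟨(k, v), h1, rfl⟩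
        exact (List.nodup_cons.mp (by simpa using hnd)).1 (he ▸ this)
      simp only [hk, if_false]
      exact ih (List.nodup_cons.mp (by simpa using hnd)).2 h1

theorem fold_all_falsy {l : List (String × String)} (acc : Option (String × String))
    (h : ∀ p ∈ l, p.2 = "") : l.foldl mimeBStep acc = acc := by
  induction l generalizing acc with
  | nil => rfl
  | cons p t ih =>
    have hp : p.2 = "" := h p (List.mem_cons_self)
    have : mimeBStep acc p = acc := by simp [mimeBStep, hp]
    rw [List.foldl_cons, this]
    exact ih acc (fun q hq => h q (List.mem_cons_of_mem _ hq))

theorem fold_keeps_min {l : List (String × String)} {b : String × String}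
    (hmin : ∀ p ∈ l, p.2 ≠ "" → b.1 ≤ p.1) :
    l.foldl mimeBStep (some b) = some b := by
  induction l with
  | nil => rfl
  | cons p t ih =>
    have hstep : mimeBStep (some b) p = some b := by
      by_cases hp : p.2 = ""
      · simp [mimeBStep, hp]
      · have : ¬ p.1 < b.1 := not_lt.mpr (hmin p List.mem_cons_self hp)
        simp [mimeBStep, hp, this]
    rw [List.foldl_cons, hstep]
    exact ih (fun q hq => hmin q (List.mem_cons_of_mem _ hq))

theorem fold_finds_min_from_some {l : List (String × String)} {b : String × String} {k v : String}
    (hb : b.2 ≠ "") (hm : (k, v) ∈ l) (hv : v ≠ "") (hkb : k < b.1)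
    (hmin : ∀ p ∈ l, p.2 ≠ "" → k ≤ p.1) (hnd : (l.map Prod.fst).Nodup) :
    l.foldl mimeBStep (some b) = some (k, v) := by
  induction l generalizing b with
  | nil => simp at hm
  | cons p t ih =>
    have hnd' : p.1 ∉ t.map Prod.fst ∧ (t.map Prod.fst).Nodup := by
      rw [List.map_cons, List.nodup_cons] at hnd; exact hnd
    rcases List.mem_cons.mp hm with h1 | h1
    · cases h1
      have hstep : mimeBStep (some b) (k, v) = some (k, v) := by simp [mimeBStep, hv, hkb]
      rw [List.foldl_cons, hstep]
      exact fold_keeps_min (fun q hq => hmin q (List.mem_cons_of_mem _ hq))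
    · have hkmem : k ∈ t.map Prod.fst := List.mem_map.mpr ⟨(k, v), h1, rfl⟩
      by_cases hp : p.2 = ""
      · have hstep : mimeBStep (some b) p = some b := by simp [mimeBStep, hp]
        rw [List.foldl_cons, hstep]
        exact ih hb h1 hkb (fun q hq => hmin q (List.mem_cons_of_mem _ hq)) hnd'.2
      · have hkp : k < p.1 := by
          have hle := hmin p List.mem_cons_self hp
          have : p.1 ≠ k := fun he => hnd'.1 (he ▸ hkmem)
          exact lt_of_le_of_ne hle (fun he => this he.symm)
        by_cases hlt : p.1 < b.1
        · have hstep : mimeBStep (some b) p = some p := by simp [mimeBStep, hp, hlt]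
          rw [List.foldl_cons, hstep]
          exact ih hp h1 hkp (fun q hq => hmin q (List.mem_cons_of_mem _ hq)) hnd'.2
        · have hstep : mimeBStep (some b) p = some b := by simp [mimeBStep, hp, hlt]
          rw [List.foldl_cons, hstep]
          exact ih hb h1 hkb (fun q hq => hmin q (List.mem_cons_of_mem _ hq)) hnd'.2

theorem fold_finds_min {l : List (String × String)} {k v : String}
    (hm : (k, v) ∈ l) (hv : v ≠ "") (hmin : ∀ p ∈ l, p.2 ≠ "" → k ≤ p.1)
    (hnd : (l.map Prod.fst).Nodup) :
    l.foldl mimeBStep none = some (k, v) := by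
  induction l with
  | nil => simp at hm
  | cons p t ih =>
    have hnd' : p.1 ∉ t.map Prod.fst ∧ (t.map Prod.fst).Nodup := by
      rw [List.map_cons, List.nodup_cons] at hnd; exact hnd
    rcases List.mem_cons.mp hm with h1 | h1
    · cases h1
      have hstep : mimeBStep none (k, v) = some (k, v) := by simp [mimeBStep, hv]
      rw [List.foldl_cons, hstep]
      exact fold_keeps_min (fun q hq => hmin q (List.mem_cons_of_mem _ hq))
    · have hkmem : k ∈ t.map Prod.fst := List.mem_map.mpr ⟨(k, v), h1, rfl⟩
      by_cases hp : p.2 = ""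
      · have hstep : mimeBStep none p = none := by simp [mimeBStep, hp]
        rw [List.foldl_cons, hstep]
        exact ih h1 (fun q hq => hmin q (List.mem_cons_of_mem _ hq)) hnd'.2
      · have hkp : k < p.1 := by
          have hle := hmin p List.mem_cons_self hp
          have : p.1 ≠ k := fun he => hnd'.1 (he ▸ hkmem)
          exact lt_of_le_of_ne hle (fun he => this he.symm)
        have hstep : mimeBStep none p = some p := by simp [mimeBStep, hp]
        rw [List.foldl_cons, hstep]
        exact fold_finds_min_from_some hp h1 hv hkp (fun q hq => hmin q (List.mem_cons_of_mem _ hq)) hnd'.2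

theorem aloop_none {bundle : List (String × String)} {ks : List String}
    (h : ∀ k ∈ ks, ∀ v, pvLookup bundle k = some v → v = "") :
    mimeALoop bundle ks = none := by
  induction ks with
  | nil => rfl
  | cons k rest ih =>
    rw [mimeALoop]
    cases hl : pvLookup bundle k with
    | none => exact ih (fun k' hk' => h k' (List.mem_cons_of_mem _ hk'))
    | some v =>
      have hv : v = "" := h k List.mem_cons_self v hl
      simp only [hv, ne_eq, not_true_eq_false, if_false]
      exact ih (fun k' hk' => h k' (List.mem_cons_of_mem _ hk'))

theorem aloop_min {bundle : List (String × String)} {ks : List String} {k v : String}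
    (hnd : (bundle.map Prod.fst).Nodup) (hm : (k, v) ∈ bundle) (hv : v ≠ "")
    (hks : ks.Pairwise (· < ·)) (hkmem : k ∈ ks)
    (hsmall : ∀ k' ∈ ks, k' < k → ∀ v', (k', v') ∈ bundle → v' = "") :
    mimeALoop bundle ks = some v := by
  induction ks with
  | nil => simp at hkmem
  | cons k' rest ih =>
    have hpw := List.pairwise_cons.mp hks
    rw [mimeALoop]
    rcases List.mem_cons.mp hkmem with h1 | h1
    · cases h1
      rw [pvLookup_of_mem_nodup hnd hm]
      simp [hv]
    · have hk'k : k' < k := hpw.1 k h1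
      cases hl : pvLookup bundle k' with
      | none => exact ih hpw.2 h1 (fun q hq => hsmall q (List.mem_cons_of_mem _ hq))
      | some v' =>
        have : v' = "" := hsmall k' List.mem_cons_self hk'k v' (pvLookup_mem hl)
        simp only [this, ne_eq, not_true_eq_false, if_false]
        exact ih hpw.2 h1 (fun q hq => hsmall q (List.mem_cons_of_mem _ hq))

-- ===== VERDICT (by name: the statement is the Claim_ definition above) =====
theorem mime_text_py_spec : Claim_equal_mime_text_py := by
  intro bundle _ hpre
  unfold Spec_mime_text_py mime_text_py mime_text_py_alt
  cases htp : pvLookup bundle "text/plain" with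
  | some t => rfl
  | none =>
    simp only []
    by_cases hall : ∀ p ∈ bundle, p.2 = ""
    · rw [fold_all_falsy none hall]
      by_cases hnil : bundle = []
      · simp [hnil]
      · simp only [hnil, if_false]
        rw [aloop_none (fun k _ v hl => hall (k, v) (pvLookup_mem hl))]
        rfl
    · rw [not_forall] at hall
      obtain ⟨p, hp⟩ := hall
      obtain ⟨hpmem, hptruthy⟩ : p ∈ bundle ∧ p.2 ≠ "" := by
        by_cases h1 : p ∈ bundle
        · exact ⟨h1, fun h2 => hp (fun _ => h2)⟩
        · exact absurd (fun h2 => absurd h2 h1) hp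
      -- the truthy entries and the minimal truthy key
      have hpT : p ∈ bundle.filter (fun q => q.2 ≠ "") := List.mem_filter.mpr ⟨hpmem, by simpa using hptruthy⟩
      have hTne : ((bundle.filter (fun q => q.2 ≠ "")).map Prod.fst) ≠ [] := by
        intro he
        have : p.1 ∈ ((bundle.filter (fun q => q.2 ≠ "")).map Prod.fst) := List.mem_map.mpr ⟨p, hpT, rfl⟩
        rw [he] at this; simp at this
      obtain ⟨m, hmin?⟩ : ∃ m, ((bundle.filter (fun q => q.2 ≠ "")).map Prod.fst).min? = some m := by
        cases he : ((bundle.filter (fun q => q.2 ≠ "")).map Prod.fst) with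
        | nil => exact absurd he hTne
        | cons x t => exact ⟨_, List.min?_cons⟩
      have hmspec := List.min?_eq_some_iff.mp hmin?
      obtain ⟨q, hqT, hqfst⟩ := List.mem_map.mp hmspec.1
      have hqmem : q ∈ bundle := (List.mem_filter.mp hqT).1
      have hqtruthy : q.2 ≠ "" := by simpa using (List.mem_filter.mp hqT).2
      have hminle : ∀ r ∈ bundle, r.2 ≠ "" → m ≤ r.1 := by
        intro r hr hrt
        exact hmspec.2 r.1 (List.mem_map.mpr ⟨r, List.mem_filter.mpr ⟨hr, by simpa using hrt⟩, rfl⟩)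
      have hq : (m, q.2) ∈ bundle := by rw [← hqfst]; exact hqmem
      -- B returns q.2
      rw [fold_finds_min hq hqtruthy hminle hpre]
      -- A returns q.2 as well
      have hnil : bundle ≠ [] := fun he => by rw [he] at hpmem; simp at hpmem
      simp only [hnil, if_false]
      have hkeys : (PySem.List.sorted (PySem.List.dedup (bundle.map Prod.fst)) (fun k => k) false).Pairwise (· < ·) := by
        refine List.SortedLT.pairwise ?_
        refine List.SortedLE.sortedLT_of_nodup (List.Pairwise.sortedLE ?_) ?_
        · exact PySem.List.sorted_pairwise _ _
        · exact ((PySem.List.sorted_perm _ _ _).nodup_iff).mpr (PySem.List.nodup_dedup _)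
      have hmmem : m ∈ PySem.List.sorted (PySem.List.dedup (bundle.map Prod.fst)) (fun k => k) false := by
        rw [PySem.List.mem_sorted, PySem.List.mem_dedup]
        exact List.mem_map.mpr ⟨(m, q.2), hq, rfl⟩
      have hsmall : ∀ k' ∈ PySem.List.sorted (PySem.List.dedup (bundle.map Prod.fst)) (fun k => k) false,
          k' < m → ∀ v', (k', v') ∈ bundle → v' = "" := by
        intro k' _ hk'm v' hv'mem
        by_contra hv'
        exact absurd (hminle (k', v') hv'mem hv') (not_le.mpr hk'm)
      rw [aloop_min hpre hq hqtruthy hkeys hmmem hsmall]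
      rfl
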